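-- pv_equiv track=rewrite | github.com/inon-peled/advent_of_code | y2016/d14/part2.py | _check_rep_in_first_element
-- ===== SOURCE A (Python) =====
-- def _check_rep_in_first_element(buffer):
--     b = buffer[0]
--     found_rep = None
--
--     for i in range(len(b) - 2):
--         if b[i] == b[i + 1] == b[i + 2]:
--             found_rep = b[i]
--             break
--
--     return found_rep
-- ===== SOURCE B (Python) =====
-- def _check_rep_in_first_element(buffer):
--     # Decompose buffer[0] into maximal runs of equal characters;
--     # return the character of the first run of length >= 3.
--     rest = list(buffer[0])
--     while rest:
--         c = rest[0]
--         run = 1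
--         rest = rest[1:]
--         while rest and rest[0] == c:
--             run += 1
--             rest = rest[1:]
--         if run >= 3:
--             return c
--     return None
-- ===== Notes on version B (the rewrite author's own statement) =====
-- stated objective: alternative
-- what changed: B splits the string into maximal runs of equal characters and returns the first run's character with length >= 3, instead of A's index loop testing every overlapping triple b[i]==b[i+1]==b[i+2] with a flag and break.
import Mathlib
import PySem

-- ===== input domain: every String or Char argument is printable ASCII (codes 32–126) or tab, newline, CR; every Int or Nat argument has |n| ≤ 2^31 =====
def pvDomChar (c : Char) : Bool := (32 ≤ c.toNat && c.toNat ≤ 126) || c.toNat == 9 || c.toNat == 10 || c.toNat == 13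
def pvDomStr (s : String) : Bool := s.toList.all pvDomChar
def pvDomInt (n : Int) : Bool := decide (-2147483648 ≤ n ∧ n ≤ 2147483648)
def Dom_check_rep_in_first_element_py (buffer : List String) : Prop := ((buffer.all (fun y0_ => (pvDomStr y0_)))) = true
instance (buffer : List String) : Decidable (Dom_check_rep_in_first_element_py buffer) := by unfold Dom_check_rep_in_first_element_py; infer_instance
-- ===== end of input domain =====

-- B scans maximal runs of equal characters and returns the first run of length >= 3,
-- instead of A's index loop over every overlapping triple (alternative decomposition, same cost).

-- ===== PORT A =====
-- the 'for i in range(len(b) - 2)' loop with break: recursion over the remaining index list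
def pvA_loop (b : List Char) : List Int → Option Char
  | [] => none
  | i :: rest =>
    match PySem.List.pyGet? b i, PySem.List.pyGet? b (i + 1), PySem.List.pyGet? b (i + 2) with
    | some x, some y, some z => if x = y ∧ y = z then some x else pvA_loop b rest
    | _, _, _ => none   -- unreachable: every i in range(len(b) - 2) has i, i+1, i+2 in range

def check_rep_in_first_element_py (buffer : List String) : Option String :=
  match PySem.List.pyGet? buffer 0 with
  | none => none   -- buffer[0] raises IndexError; excluded by Pre_
  | some s =>
    (pvA_loop s.toList (PySem.List.pyRange 0 ((s.toList.length : Int) - 2) 1)).map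
      (fun c => String.mk [c])

-- ===== PORT B =====
-- inner while loop: consume the run of characters equal to c, counting it
def pvB_inner (c : Char) (run : Nat) : List Char → Nat × List Char
  | [] => (run, [])
  | x :: xs => if x == c then pvB_inner c (run + 1) xs else (run, x :: xs)

-- termination fact for the outer loop (cited in its decreasing_by)
theorem pvB_inner_length_le (c : Char) (r : Nat) (l : List Char) :
    (pvB_inner c r l).2.length ≤ l.length := by
  induction l generalizing r with
  | nil => simp [pvB_inner]
  | cons x xs ih =>
    by_cases h : x == c
    · simpa [pvB_inner, h] using Nat.le_succ_of_le (ih (r + 1))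
    · simp [pvB_inner, h]

-- outer while loop over the remaining suffix
def pvB_outer : List Char → Option Char
  | [] => none
  | c :: rest =>
    let p := pvB_inner c 1 rest
    if p.1 ≥ 3 then some c else pvB_outer p.2
termination_by l => l.length
decreasing_by
  simpa using Nat.lt_succ_of_le (pvB_inner_length_le c 1 rest)

def check_rep_in_first_element_py_alt (buffer : List String) : Option String :=
  match PySem.List.pyGet? buffer 0 with
  | none => none   -- buffer[0] raises IndexError; excluded by Pre_
  | some s => (pvB_outer s.toList).map (fun c => String.mk [c])

-- ===== PRECONDITION & SPEC =====
-- buffer[0] raises IndexError (in A and in B alike) on the empty list; Pre_ excludes exactly that input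
def Pre_check_rep_in_first_element_py (buffer : List String) : Prop := buffer ≠ []
instance (buffer : List String) : Decidable (Pre_check_rep_in_first_element_py buffer) := by
  unfold Pre_check_rep_in_first_element_py; infer_instance

def pvWitness_check_rep_in_first_element_py : List String := ["xaabbbq"]

def Spec_check_rep_in_first_element_py (buffer : List String) (out : Option String) : Prop := out = check_rep_in_first_element_py_alt buffer
instance (buffer : List String) (out : Option String) : Decidable (Spec_check_rep_in_first_element_py buffer out) := by unfold Spec_check_rep_in_first_element_py; infer_instance

-- ===== CLAIM (what is proved, stated in full; the proofs are below) =====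
def Claim_equal_check_rep_in_first_element_py : Prop := ∀ (buffer : List String), Dom_check_rep_in_first_element_py buffer → Pre_check_rep_in_first_element_py buffer → Spec_check_rep_in_first_element_py buffer (check_rep_in_first_element_py buffer)

-- ===== LEMMAS AND PROOFS =====

theorem pvRange_empty (a b : Int) (h : b ≤ a) : PySem.List.pyRange a b 1 = [] := by
  rw [PySem.List.pyRange_one, show (b - a).toNat = 0 by omega]; simp

-- bridge form of A's loop: structural recursion on overlapping triples
def pvScanA : List Char → Option Char
  | x :: y :: z :: t => if x = y ∧ y = z then some x else pvScanA (y :: z :: t)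
  | _ => none

theorem pvA_loop_eq_scanA (l pre : List Char) :
    pvA_loop (pre ++ l) (PySem.List.pyRange pre.length (pre.length + ((l.length : Int) - 2)) 1)
      = pvScanA l := by
  induction l generalizing pre with
  | nil =>
    rw [pvRange_empty _ _ (by simp)]
    simp [pvA_loop, pvScanA]
  | cons x xs ih =>
    match xs with
    | [] =>
      rw [pvRange_empty _ _ (by simp)]
      simp [pvA_loop, pvScanA]
    | [y] =>
      rw [pvRange_empty _ _ (by simp)]
      simp [pvA_loop, pvScanA]
    | y :: z :: t =>
      have hlt : (pre.length : Int) < (pre.length : Int) + (((x::y::z::t).length : Int) - 2) := by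
        simp; omega
      rw [PySem.List.pyRange_one_cons hlt]
      have g0 : PySem.List.pyGet? (pre ++ x::y::z::t) (pre.length : Int) = some x :=
        PySem.List.pyGet?_append_length ..
      have g1 : PySem.List.pyGet? (pre ++ x::y::z::t) ((pre.length : Int) + 1) = some y := by
        have := PySem.List.pyGet?_append_right (pre := pre) (ys := x::y::z::t) (k := 1)
        simpa using this
      have g2 : PySem.List.pyGet? (pre ++ x::y::z::t) ((pre.length : Int) + 2) = some z := by
        have := PySem.List.pyGet?_append_right (pre := pre) (ys := x::y::z::t) (k := 2)
        simpa using this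
      rw [pvA_loop, g0, g1, g2]
      by_cases h : x = y ∧ y = z
      · simp [pvScanA, h]
      · simp only [h, if_false]
        have ihx := ih (pre ++ [x])
        rw [List.append_assoc] at ihx
        simp only [List.length_append, List.length_singleton, List.singleton_append] at ihx
        rw [show pvScanA (x::y::z::t) = pvScanA (y::z::t) by rw [pvScanA]; simp [h]]
        have hstart : (((pre.length + 1 : Nat)) : Int) = (pre.length : Int) + 1 := by push_cast; ring
        have hstop : (pre.length : Int) + 1 + (((y::z::t).length : Int) - 2)
            = (pre.length : Int) + (((x::y::z::t).length : Int) - 2) := by simp; ring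
        rw [hstart, hstop] at ihx
        exact ihx

theorem pvB_inner_spec (c : Char) (r : Nat) (l : List Char) :
    pvB_inner c r l = (r + (l.takeWhile (· == c)).length, l.dropWhile (· == c)) := by
  induction l generalizing r with
  | nil => simp [pvB_inner]
  | cons x xs ih =>
    by_cases h : x == c
    · simp [pvB_inner, h, ih]; omega
    · simp [pvB_inner, h]

theorem pvScanA_ne_head (c y : Char) (r : List Char) (h : ¬ c = y) :
    pvScanA (c :: y :: r) = pvScanA (y :: r) := by
  match r with
  | [] => simp [pvScanA]
  | z :: t => rw [pvScanA]; simp [h]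

theorem pvScanA_eq_outer (l : List Char) : pvScanA l = pvB_outer l := by
  induction hn : l.length using Nat.strong_induction_on generalizing l with
  | _ n ihn =>
    match l with
    | [] => simp [pvScanA, pvB_outer]
    | [c] => simp [pvScanA, pvB_outer, pvB_inner]
    | c :: y :: rest2 =>
      rw [pvB_outer]
      simp only [pvB_inner_spec]
      by_cases hyc : y = c
      · subst hyc
        match rest2 with
        | [] => simp [pvScanA, pvB_outer]
        | z :: t =>
          by_cases hzc : z = y
          · subst hzc
            simp [pvScanA]
            exact fun hh => absurd hh (by omega)
          · have hzy : ¬ y = z := fun h => hzc h.symm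
            have hrec : pvScanA (z :: t) = pvB_outer (z :: t) :=
              ihn (z :: t).length (by subst hn; simp) (z :: t) rfl
            simp only [List.takeWhile_cons, List.dropWhile_cons, beq_self_eq_true, if_true,
              beq_iff_eq, hzc, if_false]
            rw [show pvScanA (y :: y :: z :: t) = pvScanA (z :: t) by
              rw [pvScanA]; simp [hzy]; exact pvScanA_ne_head y z t hzy]
            simpa using hrec
      · have hcy : ¬ c = y := fun h => hyc h.symm
        have hrec : pvScanA (y :: rest2) = pvB_outer (y :: rest2) :=
          ihn (y :: rest2).length (by subst hn; simp) (y :: rest2) rfl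
        simp only [List.takeWhile_cons, List.dropWhile_cons, beq_iff_eq, hyc, if_false]
        rw [pvScanA_ne_head c y rest2 hcy]
        simpa using hrec

-- ===== VERDICT (by name: the statement is the Claim_ definition above) =====
theorem check_rep_in_first_element_py_spec : Claim_equal_check_rep_in_first_element_py := by
  intro buffer _hdom hpre
  unfold Spec_check_rep_in_first_element_py
  unfold check_rep_in_first_element_py check_rep_in_first_element_py_alt
  match buffer, hpre with
  | s :: bs, _ =>
    simp only [PySem.List.pyGet?_zero_cons]
    have h := pvA_loop_eq_scanA s.toList []
    simp only [List.nil_append, List.length_nil, Nat.cast_zero, zero_add] at h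
    rw [h, pvScanA_eq_outer]
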